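-- pv_equiv track=rewrite | github.com/rlafl7942/CodingTest | 프로그래머스/1/160586. 대충 만든 자판/대충 만든 자판.py | solution
-- ===== SOURCE A (Python) =====
-- def solution(keymap, targets):
--     answer = []
--     dic = dict()
--     for maps in keymap:
--         for index, value in enumerate(maps):
--             if value in dic:
--                 if dic[value] > index:
--                     dic[value] = index
--             else:
--                 dic[value] = index
--     for target in targets:
--         cnt=0
--         flag=0
--         for index, value in enumerate(target):
--             if value in dic:
--                 cnt+=dic[value]+1
--             else:
--                 flag=1
--                 break
--         if flag==1:
--             answer.append(-1)
--         else:
--             answer.append(cnt)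
--     return answer
-- ===== SOURCE B (Python) =====
-- def solution(keymap, targets):
--     # Simpler: no precomputed dict; per character, scan all keymaps on demand.
--     def press(c):
--         idxs = [k.index(c) for k in keymap if c in k]
--         return min(idxs) + 1 if idxs else None
--
--     answer = []
--     for target in targets:
--         costs = [press(c) for c in target]
--         answer.append(-1 if None in costs else sum(costs))
--     return answer
-- ===== Notes on version B (the rewrite author's own statement) =====
-- stated objective: simpler
-- what changed: Drops A's precomputed min-index dict and flag/break loop: each character's press cost is computed on demand as min over all keymaps of the first-occurrence index (+1), and each target is reduced from its list of per-character costs (-1 if any is missing).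
import Mathlib
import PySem

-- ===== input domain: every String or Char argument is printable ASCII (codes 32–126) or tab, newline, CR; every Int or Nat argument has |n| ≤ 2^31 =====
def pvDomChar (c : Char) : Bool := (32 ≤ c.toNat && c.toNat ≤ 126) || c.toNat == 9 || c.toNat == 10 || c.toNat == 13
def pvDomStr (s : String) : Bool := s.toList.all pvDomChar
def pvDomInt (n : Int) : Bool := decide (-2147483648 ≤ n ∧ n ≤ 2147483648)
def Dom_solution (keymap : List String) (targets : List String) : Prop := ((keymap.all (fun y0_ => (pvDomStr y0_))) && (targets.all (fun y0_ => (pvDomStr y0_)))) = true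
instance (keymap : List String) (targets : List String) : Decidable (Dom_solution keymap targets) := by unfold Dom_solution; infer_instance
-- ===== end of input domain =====

-- B is a simpler re-implementation: no precomputed dict; each character's cost is
-- the minimum first-occurrence index over all keymaps, computed on demand.

-- ===== PORT A =====
-- the dict-building loop of A
def buildDic (keymap : List String) : PySem.Dict Char Int :=
  keymap.foldl (fun dic maps =>
    (PySem.List.enumerate maps.toList).foldl (fun dic p =>
      match dic.get? p.2 with
      | some v => if v > p.1 then dic.insert p.2 p.1 else dic
      | none => dic.insert p.2 p.1) dic) PySem.Dict.empty

-- A's inner target loop: cnt/flag with 'break' on a missing character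
def targLoopA (dic : PySem.Dict Char Int) : List Char → Int → Int
  | [], cnt => cnt
  | c :: rest, cnt =>
    match dic.get? c with
    | some v => targLoopA dic rest (cnt + (v + 1))
    | none => -1

def solution (keymap : List String) (targets : List String) : List Int :=
  targets.foldl (fun answer target => answer ++ [targLoopA (buildDic keymap) target.toList 0]) []

-- ===== PORT B =====
-- press(c): indices of c's first occurrence in each keymap containing it; min + 1
def pressB (keymap : List String) (c : Char) : Option Int :=
  let idxs := keymap.filterMap (fun k => PySem.List.index? k.toList c)
  (PySem.List.min? idxs (fun y => y)).map (fun m => (m : Int) + 1)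

def solution_alt (keymap : List String) (targets : List String) : List Int :=
  targets.foldl (fun answer target =>
    answer ++ [if none ∈ target.toList.map (pressB keymap) then -1
               else (target.toList.map (pressB keymap)).foldl (fun s o => s + o.getD 0) 0]) []

-- ===== PRECONDITION & SPEC =====
def Spec_solution (keymap : List String) (targets : List String) (out : List Int) : Prop := out = solution_alt keymap targets
instance (keymap : List String) (targets : List String) (out : List Int) : Decidable (Spec_solution keymap targets out) := by unfold Spec_solution; infer_instance

-- ===== CLAIM (what is proved, stated in full; the proofs are below) =====
def Claim_equal_solution : Prop := ∀ (keymap : List String) (targets : List String), Dom_solution keymap targets → Spec_solution keymap targets (solution keymap targets)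

-- ===== LEMMAS AND PROOFS =====

-- option-min combinators (Int side for the dict, Nat side for B's min?)
def mI (o p : Option Int) : Option Int :=
  match o, p with
  | none, q => q
  | some a, none => some a
  | some a, some b => some (min a b)

def mN (o p : Option Nat) : Option Nat :=
  match o, p with
  | none, q => q
  | some a, none => some a
  | some a, some b => some (min a b)

theorem mI_none_right (o : Option Int) : mI o none = o := by cases o <;> rfl

theorem mN_none_right (o : Option Nat) : mN o none = o := by cases o <;> rfl

theorem mI_assoc (a b c : Option Int) : mI (mI a b) c = mI a (mI b c) := by
  cases a <;> cases b <;> cases c <;> simp [mI, min_assoc]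

theorem mN_assoc (a b c : Option Nat) : mN (mN a b) c = mN a (mN b c) := by
  cases a <;> cases b <;> cases c <;> simp [mN, min_assoc]

theorem mI_map_cast (a b : Option Nat) :
    mI (a.map (fun k : Nat => (k : Int))) (b.map (fun k : Nat => (k : Int))) =
      (mN a b).map (fun k : Nat => (k : Int)) := by
  cases a <;> cases b <;> simp [mI, mN, Nat.cast_min]

theorem foldl_min_comm (l : List Nat) (i j : Nat) :
    l.foldl min (min i j) = min i (l.foldl min j) := by
  induction l generalizing j with
  | nil => rfl
  | cons a l ih =>
      simp only [List.foldl_cons]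
      rw [min_assoc, ih]

theorem mN_cons_min? (i : Nat) (l : List Nat) :
    mN (some i) (PySem.List.min? l (fun y => y)) = PySem.List.min? (i :: l) (fun y => y) := by
  cases l with
  | nil => simp [PySem.List.min?, mN]
  | cons j l =>
      rw [PySem.List.min?_id_cons, PySem.List.min?_id_cons]
      simp [mN, List.foldl_cons, foldl_min_comm]

-- B's min-over-filterMap as a foldl of mN
theorem foldl_mN_filterMap (g : String → Option Nat) (km : List String) (o : Option Nat) :
    km.foldl (fun acc k => mN acc (g k)) o =
      mN o (PySem.List.min? (km.filterMap g) (fun y => y)) := by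
  induction km generalizing o with
  | nil => cases o <;> rfl
  | cons k km ih =>
      simp only [List.foldl_cons, List.filterMap_cons]
      cases h : g k with
      | none => rw [ih, mN_none_right]
      | some i =>
          rw [ih, ← mN_cons_min?, ← mN_assoc]

-- A's inner dict loop: the lookup after folding one keymap
theorem inner_get? (l : List Char) (s : Int) (d : PySem.Dict Char Int) (x : Char) :
    ((PySem.List.enumerate l s).foldl (fun dic p =>
      match dic.get? p.2 with
      | some v => if v > p.1 then dic.insert p.2 p.1 else dic
      | none => dic.insert p.2 p.1) d).get? x =
    mI (d.get? x) ((PySem.List.index? l x).map (fun k : Nat => s + (k : Int))) := by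
  induction l generalizing s d with
  | nil => simp [PySem.List.enumerate_nil, PySem.List.index?, mI_none_right]
  | cons a l ih =>
      rw [PySem.List.enumerate_cons]
      simp only [List.foldl_cons]
      by_cases hx : x = a
      · subst hx
        rw [ih, PySem.List.index?_cons_self]
        have hd : (match d.get? x with
            | some v => if v > s then d.insert x s else d
            | none => d.insert x s).get? x = mI (d.get? x) (some s) := by
          cases h : d.get? x with
          | none => simp [mI, PySem.Dict.get?_insert_self]
          | some v =>
              by_cases hv : v > s
              · simp [hv, mI, PySem.Dict.get?_insert_self, min_eq_right (le_of_lt hv)]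
              · simp [hv, h, mI, min_eq_left (not_lt.mp hv)]
          
        rw [hd]
        cases h : PySem.List.index? l x with
        | none => simp [mI_none_right]
        | some k =>
            simp only [Option.map_some]
            rw [mI_assoc]
            have h2 : mI (some s) (some (s + 1 + (k : Int))) = some s := by
              simp [mI, min_eq_left (show s ≤ s + 1 + (k : Int) by omega)]
            rw [h2]
            norm_num
      · have hne : (a == x) = false := by simp [BEq.beq]; exact fun h => hx h.symm
        have hd : (match d.get? a with
            | some v => if v > s then d.insert a s else d
            | none => d.insert a s).get? x = d.get? x := by
          cases h : d.get? a with
          | none => rw [PySem.Dict.get?_insert]; simp [hx]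
          | some v =>
              by_cases hv : v > s
              · simp only [hv, if_pos]
                rw [PySem.Dict.get?_insert]; simp [hx]
              · simp [hv]
        rw [ih, hd, PySem.List.index?_cons_of_ne l (Ne.symm hx)]
        cases PySem.List.index? l x with
        | none => rfl
        | some k =>
            simp only [Option.map_some]
            congr 2
            push_cast
            ring

-- the full dict: get? is the mI-fold of per-keymap first-occurrence indices
theorem buildDic_get? (keymap : List String) (x : Char) :
    (buildDic keymap).get? x =
      ((PySem.List.min? (keymap.filterMap (fun k => PySem.List.index? k.toList x)) (fun y => y)).map
        (fun k : Nat => (k : Int))) := by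
  unfold buildDic
  have main : ∀ (km : List String) (d : PySem.Dict Char Int),
      (km.foldl (fun dic maps =>
        (PySem.List.enumerate maps.toList).foldl (fun dic p =>
          match dic.get? p.2 with
          | some v => if v > p.1 then dic.insert p.2 p.1 else dic
          | none => dic.insert p.2 p.1) dic) d).get? x =
      mI (d.get? x)
        ((km.foldl (fun acc k => mN acc (PySem.List.index? k.toList x)) none).map
          (fun k : Nat => (k : Int))) := by
    intro km
    induction km with
    | nil => intro d; simp [mI_none_right]
    | cons k km ih =>
        intro d
        simp only [List.foldl_cons]
        rw [ih, inner_get?]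
        have h0 : (PySem.List.index? k.toList x).map (fun j : Nat => (0 : Int) + (j : Int)) =
            (PySem.List.index? k.toList x).map (fun j : Nat => (j : Int)) := by
          cases PySem.List.index? k.toList x <;> simp
        rw [h0, foldl_mN_filterMap, foldl_mN_filterMap]
        simp only [show ∀ q : Option Nat, mN none q = q from fun _ => rfl]
        rw [← mI_map_cast, ← mI_assoc]
  rw [main, foldl_mN_filterMap]
  simp [mN, mI, PySem.Dict.get?_empty]

theorem pressB_eq (keymap : List String) (c : Char) :
    pressB keymap c = ((buildDic keymap).get? c).map (fun v => v + 1) := by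
  rw [pressB, buildDic_get?]
  cases PySem.List.min? (keymap.filterMap fun k => PySem.List.index? k.toList c) (fun y => y) <;> simp

theorem targLoop_eq (keymap : List String) (t : List Char) (cnt : Int) :
    targLoopA (buildDic keymap) t cnt =
      (if none ∈ t.map (pressB keymap) then -1
       else (t.map (pressB keymap)).foldl (fun s o => s + o.getD 0) cnt) := by
  induction t generalizing cnt with
  | nil => simp [targLoopA]
  | cons c t ih =>
      simp only [List.map_cons, List.mem_cons, List.foldl_cons, targLoopA]
      rw [pressB_eq]
      cases h : (buildDic keymap).get? c with
      | none => simp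
      | some v =>
          simp only [Option.map_some, Option.getD_some]
          rw [ih]
          have : (none = some (v + 1)) = False := by simp
          simp [this]

theorem foldl_append_map {α β : Type} (f : α → β) (ts : List α) (acc : List β) :
    ts.foldl (fun a t => a ++ [f t]) acc = acc ++ ts.map f := by
  induction ts generalizing acc with
  | nil => simp
  | cons t ts ih => simp [ih]

-- ===== VERDICT (by name: the statement is the Claim_ definition above) =====
theorem solution_spec : Claim_equal_solution := by
  intro keymap targets _
  unfold Spec_solution solution solution_alt
  simp only [foldl_append_map, List.nil_append]
  apply List.map_congr_left
  intro t _
  exact targLoop_eq keymap t.toList 0
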